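-- pv_equiv track=rewrite | github.com/ivankartac/boulder | boulder/dialogue_template_generator.py | remove_messages_and_track_indices
-- ===== SOURCE A (Python) =====
-- def remove_messages_and_track_indices(dialogue: list[dict]) -> tuple[list[dict], dict[int, dict]]:
--     removed_messages = {}
--     filtered_dialogue = []
--
--     last_user_idx = None
--     for idx in range(len(dialogue) - 1, -1, -1):
--         if dialogue[idx]["role"] == "user":
--             last_user_idx = idx
--             break
--
--     for idx, message in enumerate(dialogue):
--         if message["role"] == "placeholder":
--             removed_messages[idx] = message
--         elif idx == last_user_idx:
--             removed_messages[idx] = message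
--         else:
--             filtered_dialogue.append(message)
--
--     return filtered_dialogue, removed_messages
-- ===== SOURCE B (Python) =====
-- def remove_messages_and_track_indices(dialogue: list[dict]) -> tuple[list[dict], dict[int, dict]]:
--     # Single backward pass: the first 'user' seen from the end is the last user.
--     filtered_rev = []
--     removed_rev = []
--     seen_user = False
--     for idx in range(len(dialogue) - 1, -1, -1):
--         message = dialogue[idx]
--         role = message["role"]
--         if role == "placeholder":
--             removed_rev.append((idx, message))
--         elif role == "user" and not seen_user:
--             seen_user = True
--             removed_rev.append((idx, message))
--         else:
--             filtered_rev.append(message)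
--     filtered_rev.reverse()
--     removed_rev.reverse()
--     return filtered_rev, dict(removed_rev)
-- ===== Notes on version B (the rewrite author's own statement) =====
-- stated objective: alternative
-- what changed: Replaces A's two traversals (a backward scan to find the last user's index, then a forward filter keyed on that index) by a single backward pass with a seen_user flag that classifies every message directly, building both outputs back-to-front.
import Mathlib
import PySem

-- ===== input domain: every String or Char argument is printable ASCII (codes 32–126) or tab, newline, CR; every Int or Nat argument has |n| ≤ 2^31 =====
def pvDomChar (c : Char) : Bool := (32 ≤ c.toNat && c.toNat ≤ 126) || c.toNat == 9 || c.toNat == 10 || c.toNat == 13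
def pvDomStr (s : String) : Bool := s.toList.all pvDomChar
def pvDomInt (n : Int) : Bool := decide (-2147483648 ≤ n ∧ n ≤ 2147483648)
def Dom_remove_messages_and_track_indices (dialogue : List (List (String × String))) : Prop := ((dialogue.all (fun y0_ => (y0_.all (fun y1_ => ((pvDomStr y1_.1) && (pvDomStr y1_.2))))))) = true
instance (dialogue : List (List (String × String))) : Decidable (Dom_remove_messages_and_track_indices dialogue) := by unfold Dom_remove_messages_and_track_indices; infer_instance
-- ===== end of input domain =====

-- B replaces A's two traversals (a backward search for the last user, then a forward filter)
-- by a single backward pass with a seen_user flag, building both outputs back-to-front;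
-- same return value, no speed claim.

-- ===== PORT A =====

-- message["role"]; Pre_ guarantees the key exists (Python raises KeyError where get? is none)
def pvRoleD (m : List (String × String)) : String :=
  (PySem.Dict.mk m).getD "role" ""

-- A's first loop: 'for idx in range(len(dialogue)-1, -1, -1): if ... == "user": break'
def pvLastUserA (dialogue : List (List (String × String))) : List Int → Option Int
  | [] => none
  | i :: rest =>
      if pvRoleD (PySem.List.pyGetD dialogue i []) = "user" then some i
      else pvLastUserA dialogue rest

def remove_messages_and_track_indices (dialogue : List (List (String × String))) : (List (List (String × String))) × (List (Int × List (String × String))) :=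
  let last_user_idx : Option Int :=
    pvLastUserA dialogue (PySem.List.pyRange ((dialogue.length : Int) - 1) (-1) (-1))
  let st := (PySem.List.enumerate dialogue).foldl
    (fun (st : PySem.Dict Int (List (String × String)) × List (List (String × String))) p =>
      if pvRoleD p.2 = "placeholder" then (st.1.insert p.1 p.2, st.2)
      else if some p.1 = last_user_idx then (st.1.insert p.1 p.2, st.2)
      else (st.1, st.2 ++ [p.2]))
    (PySem.Dict.empty, [])
  (st.2, st.1.items)

-- ===== PORT B =====

def remove_messages_and_track_indices_alt (dialogue : List (List (String × String))) : (List (List (String × String))) × (List (Int × List (String × String))) :=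
  let st := (PySem.List.pyRange ((dialogue.length : Int) - 1) (-1) (-1)).foldl
    (fun (st : List (List (String × String)) × List (Int × List (String × String)) × Bool) idx =>
      let message := PySem.List.pyGetD dialogue idx []
      let role := pvRoleD message
      if role = "placeholder" then (st.1, st.2.1 ++ [(idx, message)], st.2.2)
      else if role = "user" ∧ st.2.2 = false then (st.1, st.2.1 ++ [(idx, message)], true)
      else (st.1 ++ [message], st.2.1, st.2.2))
    ([], [], false)
  (st.1.reverse, st.2.1.reverse)

-- ===== PRECONDITION & SPEC =====

-- Pre_ excludes exactly the inputs where the Python raises KeyError: a message without a "role" key.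
def Pre_remove_messages_and_track_indices (dialogue : List (List (String × String))) : Prop :=
  (dialogue.all (fun m => ((PySem.Dict.mk m).get? "role").isSome)) = true
instance (dialogue : List (List (String × String))) : Decidable (Pre_remove_messages_and_track_indices dialogue) := by unfold Pre_remove_messages_and_track_indices; infer_instance

def pvWitness_remove_messages_and_track_indices : (List (List (String × String))) :=
  [[("role", "user"), ("content", "hi")], [("role", "placeholder")], [("role", "assistant")]]

def Spec_remove_messages_and_track_indices (dialogue : List (List (String × String))) (out : (List (List (String × String))) × (List (Int × List (String × String)))) : Prop := out = remove_messages_and_track_indices_alt dialogue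
instance (dialogue : List (List (String × String))) (out : (List (List (String × String))) × (List (Int × List (String × String)))) : Decidable (Spec_remove_messages_and_track_indices dialogue out) := by unfold Spec_remove_messages_and_track_indices; infer_instance

-- ===== CLAIM (what is proved, stated in full; the proofs are below) =====
def Claim_equal_remove_messages_and_track_indices : Prop := ∀ (dialogue : List (List (String × String))), Dom_remove_messages_and_track_indices dialogue → Pre_remove_messages_and_track_indices dialogue → Spec_remove_messages_and_track_indices dialogue (remove_messages_and_track_indices dialogue)

-- ===== LEMMAS AND PROOFS =====

def pvIsP (p : Int × List (String × String)) : Bool := decide (pvRoleD p.2 = "placeholder")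
def pvIsU (p : Int × List (String × String)) : Bool := decide (pvRoleD p.2 = "user")

-- B's loop body, on an (index, message) pair
def pvBStep (st : List (List (String × String)) × List (Int × List (String × String)) × Bool)
    (p : Int × List (String × String)) :
    List (List (String × String)) × List (Int × List (String × String)) × Bool :=
  if pvRoleD p.2 = "placeholder" then (st.1, st.2.1 ++ [(p.1, p.2)], st.2.2)
  else if pvRoleD p.2 = "user" ∧ st.2.2 = false then (st.1, st.2.1 ++ [(p.1, p.2)], true)
  else (st.1 ++ [p.2], st.2.1, st.2.2)

-- the countdown index loop reads exactly the reversed enumeration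
lemma pv_countdown_map (d : List (List (String × String))) :
    (PySem.List.pyRange ((d.length : Int) - 1) (-1) (-1)).map
      (fun i => (i, PySem.List.pyGetD d i [])) = (PySem.List.enumerate d).reverse := by
  have h1 : PySem.List.pyRange ((d.length : Int) - 1) (-1) (-1)
      = (PySem.List.pyRange 0 (d.length : Int) 1).reverse := by
    rw [PySem.List.pyRange_neg_one_eq_reverse]; norm_num
  have h2 := PySem.List.enumerate_eq_map_pyRange (xs := d) (d := ([] : List (String × String)))
  simp only [PySem.List.len_eq] at h2
  rw [h1, List.map_reverse, ← h2]

-- A's backward search is find? over the reversed enumeration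
lemma pv_lastA_eq_find (d : List (List (String × String))) (l : List Int) :
    pvLastUserA d l = ((l.map (fun i => (i, PySem.List.pyGetD d i []))).find? pvIsU).map (·.1) := by
  induction l with
  | nil => rfl
  | cons i rest ih =>
      simp only [pvLastUserA, List.map_cons, List.find?]
      by_cases h : pvRoleD (PySem.List.pyGetD d i []) = "user"
      · simp [h, pvIsU]
      · simp [h, pvIsU, ih]

lemma pv_bfold_true (r : List (Int × List (String × String)))
    (f : List (List (String × String))) (rm : List (Int × List (String × String))) :
    r.foldl pvBStep (f, rm, true)
      = (f ++ (r.filter (fun p => !pvIsP p)).map (·.2), rm ++ r.filter pvIsP, true) := by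
  induction r generalizing f rm with
  | nil => simp
  | cons p rest ih =>
      by_cases hp : pvRoleD p.2 = "placeholder"
      · simp [pvBStep, hp, ih, pvIsP]
      · simp [pvBStep, hp, ih, pvIsP]

lemma pv_bfold_false (r : List (Int × List (String × String))) (hnd : r.Nodup)
    (f : List (List (String × String))) (rm : List (Int × List (String × String))) :
    r.foldl pvBStep (f, rm, false)
      = (f ++ (r.filter (fun p => !(pvIsP p || decide (r.find? pvIsU = some p)))).map (·.2),
         rm ++ r.filter (fun p => pvIsP p || decide (r.find? pvIsU = some p)),
         r.any pvIsU) := by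
  induction r generalizing f rm with
  | nil => simp
  | cons p rest ih =>
      have hnr : rest.Nodup := hnd.of_cons
      have hpr : p ∉ rest := (List.nodup_cons.mp hnd).1
      by_cases hp : pvRoleD p.2 = "placeholder"
      · -- placeholder: goes to removed; cannot be the user
        have hu : pvIsU p = false := by simp [pvIsU, hp]
        have hfind : (p :: rest).find? pvIsU = rest.find? pvIsU :=
          List.find?_cons_of_neg (by simp [hu])
        have hstep : pvBStep (f, rm, false) p = (f, rm ++ [(p.1, p.2)], false) := by
          simp [pvBStep, hp]
        rw [List.foldl_cons, hstep, ih hnr, hfind]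
        simp [List.any_cons, hu, pvIsP, hp]
      · by_cases hu : pvRoleD p.2 = "user"
        · -- the last user: removed, rest folds with the flag set
          have hup : pvIsU p = true := by simp [pvIsU, hu]
          have hfind : (p :: rest).find? pvIsU = some p := List.find?_cons_of_pos hup
          have hstep : pvBStep (f, rm, false) p = (f, rm ++ [(p.1, p.2)], true) := by
            simp [pvBStep, hu]
          rw [List.foldl_cons, hstep, pv_bfold_true, hfind]
          have hcong : ∀ q ∈ rest, (pvIsP q || decide (some p = some q)) = pvIsP q := by
            intro q hq
            have : p ≠ q := fun h => hpr (h ▸ hq)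
            simp [this]
          have hfC : rest.filter (fun q => pvIsP q || decide (some p = some q)) = rest.filter pvIsP :=
            List.filter_congr hcong
          have hfC2 : rest.filter (fun q => !(pvIsP q || decide (some p = some q)))
              = rest.filter (fun q => !pvIsP q) :=
            List.filter_congr (fun q hq => by rw [hcong q hq])
          rw [List.filter_cons, List.filter_cons, hfC, hfC2]
          simp [hup, pvIsP, hp]
        · -- ordinary message: kept
          have hup : pvIsU p = false := by simp [pvIsU, hu]
          have hfind : (p :: rest).find? pvIsU = rest.find? pvIsU :=
            List.find?_cons_of_neg (by simp [hup])
          have hnf : decide (rest.find? pvIsU = some p) = false := by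
            simp only [decide_eq_false_iff_not]
            intro h
            exact hpr (List.mem_of_find?_eq_some h)
          have hstep : pvBStep (f, rm, false) p = (f ++ [p.2], rm, false) := by
            simp [pvBStep, hp, hu]
          rw [List.foldl_cons, hstep, ih hnr, hfind]
          simp [List.any_cons, hup, pvIsP, hp, hnf]

-- A's loop body, with the precomputed last-user index L
def pvAStep (L : Option Int)
    (st : PySem.Dict Int (List (String × String)) × List (List (String × String)))
    (p : Int × List (String × String)) :
    PySem.Dict Int (List (String × String)) × List (List (String × String)) :=
  if pvRoleD p.2 = "placeholder" then (st.1.insert p.1 p.2, st.2)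
  else if some p.1 = L then (st.1.insert p.1 p.2, st.2)
  else (st.1, st.2 ++ [p.2])

lemma pv_afold (L : Option Int) (e : List (Int × List (String × String)))
    (he : (e.map (·.1)).Nodup) :
    (e.foldl (pvAStep L) (PySem.Dict.empty, [])).1.items
        = e.filter (fun p => pvIsP p || decide (some p.1 = L))
    ∧ (e.foldl (pvAStep L) (PySem.Dict.empty, [])).2
        = (e.filter (fun p => !(pvIsP p || decide (some p.1 = L)))).map (·.2) := by
  have hstep : pvAStep L = (fun st p =>
      ((if (pvIsP p || decide (some p.1 = L)) then st.1.insert p.1 p.2 else st.1 :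
          PySem.Dict Int (List (String × String))),
       (if (pvIsP p || decide (some p.1 = L)) then st.2 else st.2 ++ [p.2]))) := by
    funext st p
    by_cases h1 : pvRoleD p.2 = "placeholder" <;> by_cases h2 : some p.1 = L <;>
      simp [pvAStep, pvIsP, h1, h2]
  rw [hstep, PySem.List.foldl_prod_mk
    (fun (d : PySem.Dict Int (List (String × String))) p =>
      if (pvIsP p || decide (some p.1 = L)) then d.insert p.1 p.2 else d)
    (fun (l : List (List (String × String))) p =>
      if (pvIsP p || decide (some p.1 = L)) then l else l ++ [p.2]) e PySem.Dict.empty []]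
  constructor
  · rw [PySem.List.foldl_if_eq_foldl_filter]
    dsimp only
    have hsub : (e.filter (fun p => pvIsP p || decide (some p.1 = L))).Sublist e :=
      List.filter_sublist
    have hnd : ((e.filter (fun p => pvIsP p || decide (some p.1 = L))).map
        (fun (a : Int × List (String × String)) => a.1)).Nodup :=
      (hsub.map _).nodup he
    rw [PySem.Dict.items_foldl_insert_fresh _
      (fun (a : Int × List (String × String)) => a.1) (fun a => a.2) _
      (fun a _ => PySem.Dict.contains_empty a.1) hnd]
    simp [PySem.Dict.empty]
  · have hswap : (fun (l : List (List (String × String))) p =>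
        if (pvIsP p || decide (some p.1 = L)) then l else l ++ [p.2])
        = (fun l p => if (!(pvIsP p || decide (some p.1 = L))) then l ++ [p.2] else l) := by
      funext l p
      cases h : (pvIsP p || decide (some p.1 = L)) <;> simp
    rw [hswap, PySem.List.foldl_append_if]
    dsimp only
    simp

-- the index of the last user message, as A computes it
def pvLA (d : List (List (String × String))) : Option Int :=
  (((PySem.List.enumerate d).reverse.find? pvIsU).map (fun x => x.1))

lemma pv_L_eq (d : List (List (String × String))) :
    pvLastUserA d (PySem.List.pyRange ((d.length : Int) - 1) (-1) (-1)) = pvLA d := by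
  rw [pv_lastA_eq_find, pv_countdown_map]; rfl

lemma pv_fst_nodup (d : List (List (String × String))) :
    ((PySem.List.enumerate d).map (fun x => x.1)).Nodup := by
  rw [PySem.List.map_fst_enumerate]; exact PySem.List.nodup_pyRange_one _ _

lemma pv_keep_eq (d : List (List (String × String))) : ∀ p ∈ PySem.List.enumerate d,
    (pvIsP p || decide (some p.1 = pvLA d))
      = (pvIsP p || decide ((PySem.List.enumerate d).reverse.find? pvIsU = some p)) := by
  intro p hp
  cases hf : (PySem.List.enumerate d).reverse.find? pvIsU with
  | none => simp [pvLA, hf]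
  | some q =>
      have hq : q ∈ PySem.List.enumerate d := List.mem_reverse.mp (List.mem_of_find?_eq_some hf)
      have hinj := List.inj_on_of_nodup_map (pv_fst_nodup d)
      have hiff : (p.1 = q.1) ↔ (q = p) := ⟨fun h => (hinj hp hq h).symm, fun h => by rw [h]⟩
      simp [pvLA, hf, hiff]

lemma pv_A_char (d : List (List (String × String))) :
    remove_messages_and_track_indices d
      = (((PySem.List.enumerate d).filter
            (fun p => !(pvIsP p || decide (some p.1 = pvLA d)))).map (fun x => x.2),
         (PySem.List.enumerate d).filter (fun p => pvIsP p || decide (some p.1 = pvLA d))) := by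
  have h0 : remove_messages_and_track_indices d
      = (((PySem.List.enumerate d).foldl
            (pvAStep (pvLastUserA d (PySem.List.pyRange ((d.length : Int) - 1) (-1) (-1))))
            (PySem.Dict.empty, [])).2,
         ((PySem.List.enumerate d).foldl
            (pvAStep (pvLastUserA d (PySem.List.pyRange ((d.length : Int) - 1) (-1) (-1))))
            (PySem.Dict.empty, [])).1.items) := rfl
  rw [h0, pv_L_eq]
  rw [(pv_afold (pvLA d) _ (pv_fst_nodup d)).1, (pv_afold (pvLA d) _ (pv_fst_nodup d)).2]

lemma pv_B_char (d : List (List (String × String))) :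
    remove_messages_and_track_indices_alt d
      = ((((PySem.List.enumerate d).reverse.filter
            (fun p => !(pvIsP p || decide ((PySem.List.enumerate d).reverse.find? pvIsU = some p)))).map
            (fun x => x.2)).reverse,
         ((PySem.List.enumerate d).reverse.filter
            (fun p => pvIsP p || decide ((PySem.List.enumerate d).reverse.find? pvIsU = some p))).reverse) := by
  have h0 : remove_messages_and_track_indices_alt d
      = (((PySem.List.pyRange ((d.length : Int) - 1) (-1) (-1)).foldl
            (fun st i => pvBStep st (i, PySem.List.pyGetD d i [])) ([], [], false)).1.reverse,
         ((PySem.List.pyRange ((d.length : Int) - 1) (-1) (-1)).foldl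
            (fun st i => pvBStep st (i, PySem.List.pyGetD d i [])) ([], [], false)).2.1.reverse) := rfl
  have h1 : (PySem.List.pyRange ((d.length : Int) - 1) (-1) (-1)).foldl
      (fun st i => pvBStep st (i, PySem.List.pyGetD d i [])) ([], [], false)
      = (PySem.List.enumerate d).reverse.foldl pvBStep ([], [], false) := by
    rw [← pv_countdown_map, List.foldl_map]
  have hnd : (PySem.List.enumerate d).reverse.Nodup :=
    List.nodup_reverse.mpr ((pv_fst_nodup d).of_map)
  rw [h0, h1, pv_bfold_false _ hnd]; simp

-- ===== VERDICT (by name: the statement is the Claim_ definition above) =====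
theorem remove_messages_and_track_indices_spec : Claim_equal_remove_messages_and_track_indices := by
  intro d _ _
  unfold Spec_remove_messages_and_track_indices
  rw [pv_A_char, pv_B_char]
  have hk := pv_keep_eq d
  have h2 : (PySem.List.enumerate d).filter (fun p => pvIsP p || decide (some p.1 = pvLA d))
      = (PySem.List.enumerate d).filter
          (fun p => pvIsP p || decide ((PySem.List.enumerate d).reverse.find? pvIsU = some p)) :=
    List.filter_congr hk
  have h3 : (PySem.List.enumerate d).filter (fun p => !(pvIsP p || decide (some p.1 = pvLA d)))
      = (PySem.List.enumerate d).filter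
          (fun p => !(pvIsP p || decide ((PySem.List.enumerate d).reverse.find? pvIsU = some p))) :=
    List.filter_congr (fun p hp => by rw [hk p hp])
  rw [h2, h3, List.filter_reverse, List.filter_reverse, List.reverse_reverse,
    List.map_reverse, List.reverse_reverse]
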